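-- pv_equiv track=rewrite | github.com/garakara/python-learning-2025 | atcoder/Day1/abc114c.py | solve
-- ===== SOURCE A (Python) =====
-- def solve(n):
--     i, num, count = 0, 0, 0
--
--     while num <= n:
--         a = []
--         i = num
--
--         while i > 0:
--             a.append(i % 10)
--             i //= 10
--
--         if 1 not in a and 2 not in a and 4 not in a and 6 not in a and 8 not in a and 9 not in a and 0 not in a:
--             if 3 in a and 5 in a and 7 in a:
--                 count += 1
--
--         num += 1
--
--     return(count)
-- ===== SOURCE B (Python) =====
-- def solve(n):
--     # Generate 7-5-3 numbers directly from the digits {3,5,7} instead of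
--     # scanning every integer up to n.
--     def rec(x, s3, s5, s7):
--         cnt = 0
--         for d in (3, 5, 7):
--             y = x * 10 + d
--             if y <= n:
--                 t3, t5, t7 = s3 or d == 3, s5 or d == 5, s7 or d == 7
--                 if t3 and t5 and t7:
--                     cnt += 1
--                 cnt += rec(y, t3, t5, t7)
--         return cnt
--
--     return rec(0, False, False, False)
-- ===== Notes on version B (the rewrite author's own statement) =====
-- stated objective: faster
-- what changed: Instead of testing every integer from zero to n digit by digit, B recursively generates exactly the numbers whose digits are all drawn from the three allowed digits up to n, tracking with three boolean flags which of the allowed digits have appeared.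
import Mathlib
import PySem

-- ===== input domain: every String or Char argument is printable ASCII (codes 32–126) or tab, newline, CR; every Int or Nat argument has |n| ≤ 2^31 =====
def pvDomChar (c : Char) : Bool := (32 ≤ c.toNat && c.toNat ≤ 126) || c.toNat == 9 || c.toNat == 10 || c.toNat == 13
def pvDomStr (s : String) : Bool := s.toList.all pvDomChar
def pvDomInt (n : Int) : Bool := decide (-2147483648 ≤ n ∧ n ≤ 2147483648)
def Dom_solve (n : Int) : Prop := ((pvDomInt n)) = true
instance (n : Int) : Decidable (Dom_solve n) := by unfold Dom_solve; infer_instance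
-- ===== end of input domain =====

-- B replaces A's scan of every integer 0..n by recursive generation of the
-- numbers built from digits {3,5,7} only (asymptotically faster; return value only).

-- ===== PORT A =====
-- inner while loop of A: digits of i, least significant first
def digitsA (i : Int) : List Int :=
  if h : 0 < i then
    PySem.Int.mod i 10 :: digitsA (PySem.Int.floordiv i 10)
  else []
termination_by i.toNat
decreasing_by
  have h10 : PySem.Int.floordiv i 10 = i / 10 := PySem.Int.floordiv_eq_ediv_of_pos (by norm_num)
  omega

-- A's loop body: the two membership ifs updating count
def stepA (count : Int) (a : List Int) : Int :=
  if !(a.contains 1) && !(a.contains 2) && !(a.contains 4) && !(a.contains 6)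
      && !(a.contains 8) && !(a.contains 9) && !(a.contains 0) then
    if a.contains 3 && a.contains 5 && a.contains 7 then count + 1 else count
  else count

-- A's outer while loop
def loopA (n num count : Int) : Int :=
  if h : num ≤ n then loopA n (num + 1) (stepA count (digitsA num)) else count
termination_by (n + 1 - num).toNat
decreasing_by omega

def solve (n : Int) : Int := loopA n 0 0

-- ===== PORT B =====
-- B's recursive generator; the for-loop over (3,5,7) is unrolled; cnt is the sum
def recB (n : Int) (x : Nat) (s3 s5 s7 : Bool) : Int :=
  -- d = 3
  (if h : ((10 * x + 3 : Nat) : Int) ≤ n then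
    (if (s3 || ((3 : Nat) == 3)) && (s5 || ((3 : Nat) == 5)) && (s7 || ((3 : Nat) == 7)) then 1 else 0)
      + recB n (10 * x + 3) (s3 || ((3 : Nat) == 3)) (s5 || ((3 : Nat) == 5)) (s7 || ((3 : Nat) == 7))
  else 0)
  -- d = 5
  + (if h : ((10 * x + 5 : Nat) : Int) ≤ n then
    (if (s3 || ((5 : Nat) == 3)) && (s5 || ((5 : Nat) == 5)) && (s7 || ((5 : Nat) == 7)) then 1 else 0)
      + recB n (10 * x + 5) (s3 || ((5 : Nat) == 3)) (s5 || ((5 : Nat) == 5)) (s7 || ((5 : Nat) == 7))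
  else 0)
  -- d = 7
  + (if h : ((10 * x + 7 : Nat) : Int) ≤ n then
    (if (s3 || ((7 : Nat) == 3)) && (s5 || ((7 : Nat) == 5)) && (s7 || ((7 : Nat) == 7)) then 1 else 0)
      + recB n (10 * x + 7) (s3 || ((7 : Nat) == 3)) (s5 || ((7 : Nat) == 5)) (s7 || ((7 : Nat) == 7))
  else 0)
termination_by n.toNat + 1 - x
decreasing_by all_goals omega

def solve_alt (n : Int) : Int := recB n 0 false false false

-- ===== PRECONDITION & SPEC =====
def Spec_solve (n : Int) (out : Int) : Prop := out = solve_alt n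
instance (n : Int) (out : Int) : Decidable (Spec_solve n out) := by unfold Spec_solve; infer_instance

-- ===== CLAIM (what is proved, stated in full; the proofs are below) =====
def Claim_equal_solve : Prop := ∀ (n : Int), Dom_solve n → Spec_solve n (solve n)

-- ===== LEMMAS AND PROOFS =====

-- proof-only helpers: digit predicates on Nat
def hasd (d m : Nat) : Bool :=
  if m = 0 then false else (m % 10 == d) || hasd d (m / 10)
termination_by m
decreasing_by exact Nat.div_lt_self (by omega) (by omega)

-- "m extends x by a nonempty string of digits from {3,5,7}"
def extb (x m : Nat) : Bool :=
  if m = 0 then false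
  else (m % 10 == 3 || m % 10 == 5 || m % 10 == 7) && ((m / 10 == x) || extb x (m / 10))
termination_by m
decreasing_by exact Nat.div_lt_self (by omega) (by omega)

def hit (m : Nat) : Bool := hasd 3 m && hasd 5 m && hasd 7 m

theorem hasd_zero (d : Nat) : hasd d 0 = false := by rw [hasd]; simp

theorem extb_zero (x : Nat) : extb x 0 = false := by rw [extb]; simp

theorem hasd_append (d e x : Nat) (h1 : 0 < e) (h2 : e < 10) :
    hasd d (10 * x + e) = ((e == d) || hasd d x) := by
  rw [hasd]
  have h0 : ¬(10 * x + e = 0) := by omega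
  have hm : (10 * x + e) % 10 = e := by omega
  have hd : (10 * x + e) / 10 = x := by omega
  simp [hm, hd]
  exact fun _ => Or.inr (by omega)

theorem ext_lb (x m : Nat) (h : extb x m = true) : 10 * x + 3 ≤ m := by
  by_cases h0 : m = 0
  · rw [h0, extb_zero] at h; exact absurd h (by simp)
  · rw [extb, if_neg h0] at h
    simp only [Bool.and_eq_true, Bool.or_eq_true, beq_iff_eq] at h
    obtain ⟨hdig, hch⟩ := h
    rcases hch with heq | hrec
    · omega
    · have := ext_lb x (m / 10) hrec
      omega
termination_by m
decreasing_by exact Nat.div_lt_self (by omega) (by omega)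

theorem ext_tri (a b m : Nat) (ha : extb a m = true) (hb : extb b m = true) :
    a = b ∨ extb a b = true ∨ extb b a = true := by
  by_cases h0 : m = 0
  · rw [h0, extb_zero] at ha; exact absurd ha (by simp)
  · rw [extb, if_neg h0] at ha hb
    simp only [Bool.and_eq_true, Bool.or_eq_true, beq_iff_eq] at ha hb
    obtain ⟨hda, hca⟩ := ha
    obtain ⟨hdb, hcb⟩ := hb
    rcases hca with hxa | hra <;> rcases hcb with hxb | hrb
    · exact Or.inl (hxa ▸ hxb ▸ rfl)
    · exact Or.inr (Or.inr (hxa ▸ hrb))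
    · exact Or.inr (Or.inl (hxb ▸ hra))
    · exact ext_tri a b (m / 10) hra hrb
termination_by m
decreasing_by exact Nat.div_lt_self (by omega) (by omega)

theorem ext_step (x t : Nat) : extb x t = true ↔
    ((t = 10 * x + 3 ∨ extb (10 * x + 3) t = true) ∨
     (t = 10 * x + 5 ∨ extb (10 * x + 5) t = true) ∨
     (t = 10 * x + 7 ∨ extb (10 * x + 7) t = true)) := by
  by_cases h0 : t = 0
  · subst h0
    simp only [extb_zero]
    constructor
    · intro hh; exact absurd hh (by simp)
    · rintro ((hh | hh) | (hh | hh) | (hh | hh)) <;> first | omega | exact absurd hh (by simp)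
  · have unf : ∀ y : Nat, extb y t =
        ((t % 10 == 3 || t % 10 == 5 || t % 10 == 7) && ((t / 10 == y) || extb y (t / 10))) :=
      fun y => by rw [extb, if_neg h0]
    have hIH := ext_step x (t / 10)
    rw [unf x, unf (10 * x + 3), unf (10 * x + 5), unf (10 * x + 7)]
    simp only [Bool.and_eq_true, Bool.or_eq_true, beq_iff_eq, hIH]
    constructor
    · rintro ⟨hD, hx | ((h | h) | (h | h) | (h | h))⟩
      · rcases hD with (h3 | h5) | h7
        · exact Or.inl (Or.inl (by omega))
        · exact Or.inr (Or.inl (Or.inl (by omega)))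
        · exact Or.inr (Or.inr (Or.inl (by omega)))
      · exact Or.inl (Or.inr ⟨hD, Or.inl (by omega)⟩)
      · exact Or.inl (Or.inr ⟨hD, Or.inr h⟩)
      · exact Or.inr (Or.inl (Or.inr ⟨hD, Or.inl (by omega)⟩))
      · exact Or.inr (Or.inl (Or.inr ⟨hD, Or.inr h⟩))
      · exact Or.inr (Or.inr (Or.inr ⟨hD, Or.inl (by omega)⟩))
      · exact Or.inr (Or.inr (Or.inr ⟨hD, Or.inr h⟩))
    · rintro ((h | ⟨hD, hc⟩) | (h | ⟨hD, hc⟩) | (h | ⟨hD, hc⟩))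
      · exact ⟨by omega, Or.inl (by omega)⟩
      · refine ⟨hD, Or.inr ?_⟩
        rcases hc with h | h
        · exact Or.inl (Or.inl (by omega))
        · exact Or.inl (Or.inr h)
      · exact ⟨by omega, Or.inl (by omega)⟩
      · refine ⟨hD, Or.inr ?_⟩
        rcases hc with h | h
        · exact Or.inr (Or.inl (Or.inl (by omega)))
        · exact Or.inr (Or.inl (Or.inr h))
      · exact ⟨by omega, Or.inl (by omega)⟩
      · refine ⟨hD, Or.inr ?_⟩
        rcases hc with h | h
        · exact Or.inr (Or.inr (Or.inl (by omega)))
        · exact Or.inr (Or.inr (Or.inr h))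
termination_by t
decreasing_by all_goals exact Nat.div_lt_self (by omega) (by omega)

-- pairwise exclusivity of the branch conditions
theorem ext_self_ne (a t : Nat) (h3 : 3 ≤ a) (he : t = a) : extb a t = false := by
  by_contra hx
  have := ext_lb a t (by revert hx; cases extb a t <;> simp)
  omega

theorem ext_cross (a b t : Nat) (ha : 3 ≤ a) (hlt : a < b) (hle : b ≤ a + 4) :
    ¬((t = a ∨ extb a t = true) ∧ (t = b ∨ extb b t = true)) := by
  rintro ⟨h1 | h1, h2 | h2⟩
  · omega
  · have := ext_lb b t h2; omega
  · have := ext_lb a t h1; omega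
  · rcases ext_tri a b t h1 h2 with h | h | h
    · omega
    · have := ext_lb a b h; omega
    · have := ext_lb b a h; omega

-- recB returns total unchanged once even the smallest child exceeds n
theorem recB_leaf (n : Int) (x : Nat) (s3 s5 s7 : Bool)
    (h : n < ((10 * x + 3 : Nat) : Int)) : recB n x s3 s5 s7 = 0 := by
  rw [recB]
  have g3 : ¬(10 * (x : Int) + 3 ≤ n) := by push_cast at h; omega
  have g5 : ¬(10 * (x : Int) + 5 ≤ n) := by push_cast at h; omega
  have g7 : ¬(10 * (x : Int) + 7 ≤ n) := by push_cast at h; omega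
  simp [g3, g5, g7]

-- the central difference lemma for B
theorem recB_diff (n : Int) (x : Nat) (hn : 0 ≤ n) :
    recB n x (hasd 3 x) (hasd 5 x) (hasd 7 x)
      = recB (n - 1) x (hasd 3 x) (hasd 5 x) (hasd 7 x)
        + (if extb x n.toNat && hit n.toNat then 1 else 0) := by
  have hnt : n = (n.toNat : Int) := (Int.toNat_of_nonneg hn).symm
  have h33 : hasd 3 (10 * x + 3) = true := by
    rw [hasd_append 3 3 x (by omega) (by omega)]; simp
  have h35 : hasd 5 (10 * x + 3) = hasd 5 x := by
    rw [hasd_append 5 3 x (by omega) (by omega)]; simp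
  have h37 : hasd 7 (10 * x + 3) = hasd 7 x := by
    rw [hasd_append 7 3 x (by omega) (by omega)]; simp
  have h53 : hasd 3 (10 * x + 5) = hasd 3 x := by
    rw [hasd_append 3 5 x (by omega) (by omega)]; simp
  have h55 : hasd 5 (10 * x + 5) = true := by
    rw [hasd_append 5 5 x (by omega) (by omega)]; simp
  have h57 : hasd 7 (10 * x + 5) = hasd 7 x := by
    rw [hasd_append 7 5 x (by omega) (by omega)]; simp
  have h73 : hasd 3 (10 * x + 7) = hasd 3 x := by
    rw [hasd_append 3 7 x (by omega) (by omega)]; simp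
  have h75 : hasd 5 (10 * x + 7) = hasd 5 x := by
    rw [hasd_append 5 7 x (by omega) (by omega)]; simp
  have h77 : hasd 7 (10 * x + 7) = true := by
    rw [hasd_append 7 7 x (by omega) (by omega)]; simp
  have B3 :
      (if h : ((10 * x + 3 : Nat) : Int) ≤ n then
        (if hasd 5 x && hasd 7 x then (1:Int) else 0) + recB n (10 * x + 3) true (hasd 5 x) (hasd 7 x)
      else 0)
    = (if h : ((10 * x + 3 : Nat) : Int) ≤ n - 1 then
        (if hasd 5 x && hasd 7 x then (1:Int) else 0) + recB (n - 1) (10 * x + 3) true (hasd 5 x) (hasd 7 x)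
      else 0)
      + (if (n.toNat = 10 * x + 3 ∨ extb (10 * x + 3) n.toNat = true) ∧ hit n.toNat = true then (1:Int) else 0) := by
    by_cases c : ((10 * x + 3 : Nat) : Int) ≤ n
    · by_cases e : ((10 * x + 3 : Nat) : Int) = n
      · have c' : ¬ ((10 * x + 3 : Nat) : Int) ≤ n - 1 := by omega
        rw [dif_pos c, dif_neg c']
        rw [recB_leaf n (10 * x + 3) true (hasd 5 x) (hasd 7 x) (by push_cast at e ⊢; omega)]
        have ht : n.toNat = 10 * x + 3 := by omega
        have hext : extb (10 * x + 3) (10 * x + 3) = false := ext_self_ne _ _ (by omega) rfl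
        have hhit : hit (10 * x + 3) = (hasd 5 x && hasd 7 x) := by
          unfold hit; rw [h33, h35, h37]
          simp only [Bool.true_and, Bool.and_true]
        simp only [ht, hext, hhit]
        cases hb : (hasd 5 x && hasd 7 x) <;> simp [hb]
      · have c' : ((10 * x + 3 : Nat) : Int) ≤ n - 1 := by omega
        rw [dif_pos c, dif_pos c']
        have IH := recB_diff n (10 * x + 3) hn
        rw [h33, h35, h37] at IH
        rw [IH]
        have hne : ¬ (n.toNat = 10 * x + 3) := by omega
        have hcong : ((n.toNat = 10 * x + 3 ∨ extb (10 * x + 3) n.toNat = true) ∧ hit n.toNat = true)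
            ↔ (extb (10 * x + 3) n.toNat && hit n.toNat) = true := by
          simp [hne, Bool.and_eq_true]
        rw [if_congr hcong rfl rfl]
        ring
    · have c' : ¬ ((10 * x + 3 : Nat) : Int) ≤ n - 1 := by omega
      rw [dif_neg c, dif_neg c']
      have hext : extb (10 * x + 3) n.toNat = false := by
        cases hx : extb (10 * x + 3) n.toNat
        · rfl
        · have := ext_lb (10 * x + 3) n.toNat hx; push_cast at c; omega
      have hne : ¬ (n.toNat = 10 * x + 3) := by push_cast at c; omega
      simp [hext, hne]
  have B5 :
      (if h : ((10 * x + 5 : Nat) : Int) ≤ n then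
        (if hasd 3 x && hasd 7 x then (1:Int) else 0) + recB n (10 * x + 5) (hasd 3 x) true (hasd 7 x)
      else 0)
    = (if h : ((10 * x + 5 : Nat) : Int) ≤ n - 1 then
        (if hasd 3 x && hasd 7 x then (1:Int) else 0) + recB (n - 1) (10 * x + 5) (hasd 3 x) true (hasd 7 x)
      else 0)
      + (if (n.toNat = 10 * x + 5 ∨ extb (10 * x + 5) n.toNat = true) ∧ hit n.toNat = true then (1:Int) else 0) := by
    by_cases c : ((10 * x + 5 : Nat) : Int) ≤ n
    · by_cases e : ((10 * x + 5 : Nat) : Int) = n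
      · have c' : ¬ ((10 * x + 5 : Nat) : Int) ≤ n - 1 := by omega
        rw [dif_pos c, dif_neg c']
        rw [recB_leaf n (10 * x + 5) (hasd 3 x) true (hasd 7 x) (by push_cast at e ⊢; omega)]
        have ht : n.toNat = 10 * x + 5 := by omega
        have hext : extb (10 * x + 5) (10 * x + 5) = false := ext_self_ne _ _ (by omega) rfl
        have hhit : hit (10 * x + 5) = (hasd 3 x && hasd 7 x) := by
          unfold hit; rw [h53, h55, h57]
          simp only [Bool.true_and, Bool.and_true]
        simp only [ht, hext, hhit]
        cases hb : (hasd 3 x && hasd 7 x) <;> simp [hb]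
      · have c' : ((10 * x + 5 : Nat) : Int) ≤ n - 1 := by omega
        rw [dif_pos c, dif_pos c']
        have IH := recB_diff n (10 * x + 5) hn
        rw [h53, h55, h57] at IH
        rw [IH]
        have hne : ¬ (n.toNat = 10 * x + 5) := by omega
        have hcong : ((n.toNat = 10 * x + 5 ∨ extb (10 * x + 5) n.toNat = true) ∧ hit n.toNat = true)
            ↔ (extb (10 * x + 5) n.toNat && hit n.toNat) = true := by
          simp [hne, Bool.and_eq_true]
        rw [if_congr hcong rfl rfl]
        ring
    · have c' : ¬ ((10 * x + 5 : Nat) : Int) ≤ n - 1 := by omega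
      rw [dif_neg c, dif_neg c']
      have hext : extb (10 * x + 5) n.toNat = false := by
        cases hx : extb (10 * x + 5) n.toNat
        · rfl
        · have := ext_lb (10 * x + 5) n.toNat hx; push_cast at c; omega
      have hne : ¬ (n.toNat = 10 * x + 5) := by push_cast at c; omega
      simp [hext, hne]
  have B7 :
      (if h : ((10 * x + 7 : Nat) : Int) ≤ n then
        (if hasd 3 x && hasd 5 x then (1:Int) else 0) + recB n (10 * x + 7) (hasd 3 x) (hasd 5 x) true
      else 0)
    = (if h : ((10 * x + 7 : Nat) : Int) ≤ n - 1 then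
        (if hasd 3 x && hasd 5 x then (1:Int) else 0) + recB (n - 1) (10 * x + 7) (hasd 3 x) (hasd 5 x) true
      else 0)
      + (if (n.toNat = 10 * x + 7 ∨ extb (10 * x + 7) n.toNat = true) ∧ hit n.toNat = true then (1:Int) else 0) := by
    by_cases c : ((10 * x + 7 : Nat) : Int) ≤ n
    · by_cases e : ((10 * x + 7 : Nat) : Int) = n
      · have c' : ¬ ((10 * x + 7 : Nat) : Int) ≤ n - 1 := by omega
        rw [dif_pos c, dif_neg c']
        rw [recB_leaf n (10 * x + 7) (hasd 3 x) (hasd 5 x) true (by push_cast at e ⊢; omega)]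
        have ht : n.toNat = 10 * x + 7 := by omega
        have hext : extb (10 * x + 7) (10 * x + 7) = false := ext_self_ne _ _ (by omega) rfl
        have hhit : hit (10 * x + 7) = (hasd 3 x && hasd 5 x) := by
          unfold hit; rw [h73, h75, h77]
          simp only [Bool.true_and, Bool.and_true]
        simp only [ht, hext, hhit]
        cases hb : (hasd 3 x && hasd 5 x) <;> simp [hb]
      · have c' : ((10 * x + 7 : Nat) : Int) ≤ n - 1 := by omega
        rw [dif_pos c, dif_pos c']
        have IH := recB_diff n (10 * x + 7) hn
        rw [h73, h75, h77] at IH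
        rw [IH]
        have hne : ¬ (n.toNat = 10 * x + 7) := by omega
        have hcong : ((n.toNat = 10 * x + 7 ∨ extb (10 * x + 7) n.toNat = true) ∧ hit n.toNat = true)
            ↔ (extb (10 * x + 7) n.toNat && hit n.toNat) = true := by
          simp [hne, Bool.and_eq_true]
        rw [if_congr hcong rfl rfl]
        ring
    · have c' : ¬ ((10 * x + 7 : Nat) : Int) ≤ n - 1 := by omega
      rw [dif_neg c, dif_neg c']
      have hext : extb (10 * x + 7) n.toNat = false := by
        cases hx : extb (10 * x + 7) n.toNat
        · rfl
        · have := ext_lb (10 * x + 7) n.toNat hx; push_cast at c; omega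
      have hne : ¬ (n.toNat = 10 * x + 7) := by push_cast at c; omega
      simp [hext, hne]
  have hkey :
      (if (n.toNat = 10 * x + 3 ∨ extb (10 * x + 3) n.toNat = true) ∧ hit n.toNat = true then (1:Int) else 0)
    + (if (n.toNat = 10 * x + 5 ∨ extb (10 * x + 5) n.toNat = true) ∧ hit n.toNat = true then (1:Int) else 0)
    + (if (n.toNat = 10 * x + 7 ∨ extb (10 * x + 7) n.toNat = true) ∧ hit n.toNat = true then (1:Int) else 0)
    = (if extb x n.toNat && hit n.toNat then (1:Int) else 0) := by
    by_cases hH : hit n.toNat = true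
    · simp only [hH, and_true, Bool.and_true]
      have hstep := ext_step x n.toNat
      have E35 := ext_cross (10 * x + 3) (10 * x + 5) n.toNat (by omega) (by omega) (by omega)
      have E37 := ext_cross (10 * x + 3) (10 * x + 7) n.toNat (by omega) (by omega) (by omega)
      have E57 := ext_cross (10 * x + 5) (10 * x + 7) n.toNat (by omega) (by omega) (by omega)
      by_cases q3 : (n.toNat = 10 * x + 3 ∨ extb (10 * x + 3) n.toNat = true)
      · have nq5 : ¬ (n.toNat = 10 * x + 5 ∨ extb (10 * x + 5) n.toNat = true) := fun q5 => E35 ⟨q3, q5⟩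
        have nq7 : ¬ (n.toNat = 10 * x + 7 ∨ extb (10 * x + 7) n.toNat = true) := fun q7 => E37 ⟨q3, q7⟩
        have hx : extb x n.toNat = true := hstep.mpr (Or.inl q3)
        simp [q3, nq5, nq7, hx]
      · by_cases q5 : (n.toNat = 10 * x + 5 ∨ extb (10 * x + 5) n.toNat = true)
        · have nq7 : ¬ (n.toNat = 10 * x + 7 ∨ extb (10 * x + 7) n.toNat = true) := fun q7 => E57 ⟨q5, q7⟩
          have hx : extb x n.toNat = true := hstep.mpr (Or.inr (Or.inl q5))
          simp [q3, q5, nq7, hx]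
        · by_cases q7 : (n.toNat = 10 * x + 7 ∨ extb (10 * x + 7) n.toNat = true)
          · have hx : extb x n.toNat = true := hstep.mpr (Or.inr (Or.inr q7))
            simp [q3, q5, q7, hx]
          · have hx : extb x n.toNat = false := by
              cases hxx : extb x n.toNat
              · rfl
              · rcases hstep.mp hxx with h | h | h
                · exact absurd h q3
                · exact absurd h q5
                · exact absurd h q7
            simp [q3, q5, q7, hx]
    · have hH' : hit n.toNat = false := by
        cases h : hit n.toNat
        · rfl
        · exact absurd h hH
      simp [hH']
  rw [recB]
  conv_rhs => rw [recB]
  simp only [show ((3:Nat) == 3) = true by decide, show ((3:Nat) == 5) = false by decide,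
    show ((3:Nat) == 7) = false by decide, show ((5:Nat) == 3) = false by decide,
    show ((5:Nat) == 5) = true by decide, show ((5:Nat) == 7) = false by decide,
    show ((7:Nat) == 3) = false by decide, show ((7:Nat) == 5) = false by decide,
    show ((7:Nat) == 7) = true by decide, Bool.or_true, Bool.or_false,
    Bool.true_and, Bool.and_true]
  rw [B3, B5, B7]
  linarith [hkey]
termination_by n.toNat + 1 - x
decreasing_by all_goals omega

-- A-side: one-step peeling of the last iteration
theorem loopA_unfold (n num c : Int) :
    loopA n num c = if num ≤ n then loopA n (num + 1) (stepA c (digitsA num)) else c := by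
  rw [loopA]; split_ifs <;> rfl

theorem stepA_add (c : Int) (a : List Int) : stepA c a = c + stepA 0 a := by
  unfold stepA
  split_ifs <;> omega

theorem loopA_diff (n num c : Int) (h : num ≤ n) :
    loopA n num c = loopA (n - 1) num c + (stepA 0 (digitsA n)) := by
  by_cases h2 : num ≤ n - 1
  · rw [loopA_unfold n num c, loopA_unfold (n - 1) num c]
    simp only [h, h2, if_true]
    exact loopA_diff n (num + 1) (stepA c (digitsA num)) (by omega)
  · have hnum : num = n := by omega
    subst hnum
    rw [loopA_unfold num num c, loopA_unfold num (num + 1) (stepA c (digitsA num)),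
      loopA_unfold (num - 1) num c]
    simp only [le_refl, if_true, h2, if_false, show ¬(num + 1 ≤ num) by omega]
    exact stepA_add c (digitsA num)
termination_by (n - num).toNat

-- bridge: A's membership tests = the Nat digit predicates
theorem containsA (d m : Nat) :
    (digitsA (m : Int)).contains (d : Int) = hasd d m := by
  by_cases h : m = 0
  · subst h; rw [digitsA, hasd]; simp
  · have hpos : (0 : Int) < (m : Int) := by exact_mod_cast Nat.pos_of_ne_zero h
    have e1 : PySem.Int.mod (m : Int) 10 = ((m % 10 : Nat) : Int) := by
      rw [PySem.Int.mod_eq_emod_of_pos (by norm_num)]; omega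
    have e2 : PySem.Int.floordiv (m : Int) 10 = ((m / 10 : Nat) : Int) := by
      rw [PySem.Int.floordiv_eq_ediv_of_pos (by norm_num)]; omega
    have hIH := containsA d (m / 10)
    rw [digitsA, dif_pos hpos, e1, e2, hasd, if_neg h, Bool.eq_iff_iff]
    simp only [List.contains_cons, hIH, Bool.or_eq_true, beq_iff_eq, Nat.cast_inj]
    constructor
    · rintro (h' | h')
      · exact Or.inl h'.symm
      · exact Or.inr h'
    · rintro (h' | h')
      · exact Or.inl h'.symm
      · exact Or.inr h'
termination_by m
decreasing_by exact Nat.div_lt_self (by omega) (by omega)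

theorem hasd_ne_zero (d m : Nat) (h : hasd d m = true) : m ≠ 0 := by
  intro h0
  rw [h0, hasd_zero] at h
  cases h

theorem ext0_iff (m : Nat) : extb 0 m = true ↔
    (m ≠ 0 ∧ hasd 0 m = false ∧ hasd 1 m = false ∧ hasd 2 m = false ∧ hasd 4 m = false ∧
     hasd 6 m = false ∧ hasd 8 m = false ∧ hasd 9 m = false) := by
  by_cases h0 : m = 0
  · simp [h0, extb_zero]
  · have unfh : ∀ d, hasd d m = ((m % 10 == d) || hasd d (m / 10)) :=
      fun d => by rw [hasd, if_neg h0]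
    rw [extb, if_neg h0]
    by_cases hq : m / 10 = 0
    · simp only [unfh, hq, hasd_zero, Bool.or_false, Bool.and_eq_true, Bool.or_eq_true,
        beq_iff_eq, beq_eq_false_iff_ne, extb_zero]
      constructor
      · rintro ⟨hD, -⟩
        exact ⟨h0, by omega, by omega, by omega, by omega, by omega, by omega, by omega⟩
      · rintro ⟨-, e0, e1, e2, e4, e6, e8, e9⟩
        have hlt : m % 10 < 10 := by omega
        exact ⟨by omega, trivial⟩
    · have hIH := ext0_iff (m / 10)
      simp only [unfh, Bool.and_eq_true, Bool.or_eq_true, beq_iff_eq,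
        Bool.or_eq_false_iff, beq_eq_false_iff_ne, hIH, hq, false_or,
        show (m / 10 = 0) = False from by simp [hq]]
      constructor
      · rintro ⟨hD, -, hA0, hA1, hA2, hA4, hA6, hA8, hA9⟩
        exact ⟨h0, ⟨by omega, hA0⟩, ⟨by omega, hA1⟩, ⟨by omega, hA2⟩, ⟨by omega, hA4⟩,
          ⟨by omega, hA6⟩, ⟨by omega, hA8⟩, ⟨by omega, hA9⟩⟩
      · rintro ⟨-, ⟨e0, hA0⟩, ⟨e1, hA1⟩, ⟨e2, hA2⟩, ⟨e4, hA4⟩, ⟨e6, hA6⟩, ⟨e8, hA8⟩, ⟨e9, hA9⟩⟩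
        have hlt : m % 10 < 10 := by omega
        exact ⟨by omega, hq, hA0, hA1, hA2, hA4, hA6, hA8, hA9⟩
termination_by m
decreasing_by exact Nat.div_lt_self (by omega) (by omega)

theorem bridge (m : Nat) :
    stepA 0 (digitsA (m : Int)) = (if extb 0 m && hit m then 1 else 0) := by
  have c0 : (digitsA (m : Int)).contains 0 = hasd 0 m := by exact_mod_cast containsA 0 m
  have c1 : (digitsA (m : Int)).contains 1 = hasd 1 m := by exact_mod_cast containsA 1 m
  have c2 : (digitsA (m : Int)).contains 2 = hasd 2 m := by exact_mod_cast containsA 2 m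
  have c3 : (digitsA (m : Int)).contains 3 = hasd 3 m := by exact_mod_cast containsA 3 m
  have c4 : (digitsA (m : Int)).contains 4 = hasd 4 m := by exact_mod_cast containsA 4 m
  have c5 : (digitsA (m : Int)).contains 5 = hasd 5 m := by exact_mod_cast containsA 5 m
  have c6 : (digitsA (m : Int)).contains 6 = hasd 6 m := by exact_mod_cast containsA 6 m
  have c7 : (digitsA (m : Int)).contains 7 = hasd 7 m := by exact_mod_cast containsA 7 m
  have c8 : (digitsA (m : Int)).contains 8 = hasd 8 m := by exact_mod_cast containsA 8 m
  have c9 : (digitsA (m : Int)).contains 9 = hasd 9 m := by exact_mod_cast containsA 9 m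
  have hC : (extb 0 m && hit m)
      = ((!(hasd 1 m) && !(hasd 2 m) && !(hasd 4 m) && !(hasd 6 m) && !(hasd 8 m)
          && !(hasd 9 m) && !(hasd 0 m)) && (hasd 3 m && hasd 5 m && hasd 7 m)) := by
    rw [Bool.eq_iff_iff]
    simp only [hit, Bool.and_eq_true, Bool.not_eq_true', ext0_iff, and_assoc]
    constructor
    · rintro ⟨-, hA0, hA1, hA2, hA4, hA6, hA8, hA9, h3, h5, h7⟩
      exact ⟨hA1, hA2, hA4, hA6, hA8, hA9, hA0, h3, h5, h7⟩
    · rintro ⟨hA1, hA2, hA4, hA6, hA8, hA9, hA0, h3, h5, h7⟩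
      exact ⟨hasd_ne_zero 3 m h3, hA0, hA1, hA2, hA4, hA6, hA8, hA9, h3, h5, h7⟩
  unfold stepA
  rw [c0, c1, c2, c3, c4, c5, c6, c7, c8, c9, hC]
  by_cases hP : (!(hasd 1 m) && !(hasd 2 m) && !(hasd 4 m) && !(hasd 6 m) && !(hasd 8 m)
      && !(hasd 9 m) && !(hasd 0 m)) = true
  · by_cases hQ : (hasd 3 m && hasd 5 m && hasd 7 m) = true
    · simp [hP, hQ]
    · simp [hP, hQ]
  · simp [hP]

theorem key (k : Nat) : solve (k : Int) = solve_alt (k : Int) := by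
  induction k with
  | zero =>
    have e0 : ((0 : Nat) : Int) = (0 : Int) := by norm_num
    have hd0 : digitsA 0 = [] := by rw [digitsA]; norm_num
    unfold solve solve_alt
    rw [e0, recB_leaf 0 0 false false false (by norm_num)]
    rw [loopA_unfold 0 0 0, if_pos (by norm_num : (0:Int) ≤ 0),
      loopA_unfold 0 (0 + 1) _, if_neg (by norm_num : ¬ (0:Int) + 1 ≤ 0), hd0]
    unfold stepA
    simp
  | succ k ih =>
    have hcast : ((k + 1 : Nat) : Int) - 1 = (k : Int) := by push_cast; ring
    have h0le : (0 : Int) ≤ ((k + 1 : Nat) : Int) := by positivity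
    have hA := loopA_diff ((k + 1 : Nat) : Int) 0 0 h0le
    have hB := recB_diff ((k + 1 : Nat) : Int) 0 h0le
    simp only [hasd_zero] at hB
    rw [Int.toNat_natCast] at hB
    unfold solve solve_alt
    unfold solve solve_alt at ih
    rw [hA, hB, hcast, bridge (k + 1), ih]

-- ===== VERDICT (by name: the statement is the Claim_ definition above) =====
theorem solve_spec : Claim_equal_solve := by
  intro n _
  unfold Spec_solve
  by_cases hn : 0 ≤ n
  · have := key n.toNat
    rwa [Int.toNat_of_nonneg hn] at this
  · unfold solve solve_alt
    rw [loopA_unfold, if_neg (by omega), recB_leaf _ _ _ _ _ (by push_cast; omega)]
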